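-- pv_equiv track=rewrite | github.com/MashenkaOkuneva/newspaper_data_processing | SZ/umlauts_correct_sz.py | umlauts_correct_sz
-- ===== SOURCE A (Python) =====
-- def umlauts_correct_sz(text):
--
--     '''Replaces incorrectly encoded German umlaut characters with their correct versions in the given text.'''
--
--     replacements = {
--         "&auml;": "ä",
--         "&uuml;": "ü",
--         "&ouml;": "ö",
--         "&Auml;": "Ä",
--         "&Uuml;": "Ü",
--         "&Ouml;": "Ö"
--     }
--
--     for entity, replacement in replacements.items():
--         text = text.replace(entity, replacement)
--
--     return text
-- ===== SOURCE B (Python) =====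
-- def umlauts_correct_sz(text):
--     '''Replaces incorrectly encoded German umlaut characters with their correct versions in the given text.'''
--     replacements = {
--         "&auml;": "ä",
--         "&uuml;": "ü",
--         "&ouml;": "ö",
--         "&Auml;": "Ä",
--         "&Uuml;": "Ü",
--         "&Ouml;": "Ö"
--     }
--     out = []
--     i = 0
--     n = len(text)
--     while i < n:
--         chunk = text[i:i+6]
--         if chunk in replacements:
--             out.append(replacements[chunk])
--             i += 6
--         else:
--             out.append(text[i])
--             i += 1
--     return ''.join(out)
-- ===== Notes on version B (the rewrite author's own statement) =====
-- stated objective: alternative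
-- what changed: A makes six sequential full-text str.replace passes (one per entity); B makes a single left-to-right pass over the text, looking each 6-character window up in the same dict and skipping 6 on a hit.
import Mathlib
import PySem

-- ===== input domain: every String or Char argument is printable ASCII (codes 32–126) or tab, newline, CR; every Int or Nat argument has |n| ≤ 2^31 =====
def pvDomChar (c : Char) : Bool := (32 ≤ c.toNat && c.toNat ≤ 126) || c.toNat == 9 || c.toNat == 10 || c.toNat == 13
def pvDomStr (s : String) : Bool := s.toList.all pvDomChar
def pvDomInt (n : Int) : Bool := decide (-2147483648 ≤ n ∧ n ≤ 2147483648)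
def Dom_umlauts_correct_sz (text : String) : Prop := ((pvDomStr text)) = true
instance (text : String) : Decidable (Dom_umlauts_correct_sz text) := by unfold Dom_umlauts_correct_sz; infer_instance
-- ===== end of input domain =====

-- B replaces A's six sequential full-text str.replace passes by one left-to-right scan that
-- looks each 6-character window up in the same dict (objective: alternative single-pass algorithm).

-- ===== PORT A =====
-- A: build the dict, then for each (entity, replacement) item do text = text.replace(entity, replacement)
def umlauts_correct_sz (text : String) : String :=
  let replacements : PySem.Dict String String :=
    PySem.Dict.mk [("&auml;", "ä"), ("&uuml;", "ü"), ("&ouml;", "ö"),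
                   ("&Auml;", "Ä"), ("&Uuml;", "Ü"), ("&Ouml;", "Ö")]
  replacements.items.foldl (fun t p => PySem.Str.replace t p.1 p.2) text

-- ===== PORT B =====
-- B's dict (same keys and values as A's)
def pvReplB : PySem.Dict String String :=
  PySem.Dict.mk [("&auml;", "ä"), ("&uuml;", "ü"), ("&ouml;", "ö"),
                 ("&Auml;", "Ä"), ("&Uuml;", "Ü"), ("&Ouml;", "Ö")]

-- the while-loop of Source B over the character list (i advances by 6 on a dict hit, by 1 otherwise)
def pvScanB : List Char → List Char
  | [] => []
  | c :: t =>
    match pvReplB.get? (String.ofList (List.take 6 (c :: t))) with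
    | some r => r.toList ++ pvScanB (List.drop 5 t)
    | none => c :: pvScanB t
termination_by l => l.length
decreasing_by all_goals simp

def umlauts_correct_sz_alt (text : String) : String :=
  String.ofList (pvScanB text.toList)

-- ===== PRECONDITION & SPEC =====
def Spec_umlauts_correct_sz (text : String) (out : String) : Prop := out = umlauts_correct_sz_alt text
instance (text : String) (out : String) : Decidable (Spec_umlauts_correct_sz text out) := by unfold Spec_umlauts_correct_sz; infer_instance

-- ===== CLAIM (what is proved, stated in full; the proofs are below) =====
def Claim_equal_umlauts_correct_sz : Prop := ∀ (text : String), Dom_umlauts_correct_sz text → Spec_umlauts_correct_sz text (umlauts_correct_sz text)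

-- ===== LEMMAS AND PROOFS =====

-- proof-side vocabulary: the six (second entity char, replacement char) pairs, in A's dict order
def pvTbl : List (Char × Char) := [('a','ä'),('u','ü'),('o','ö'),('A','Ä'),('U','Ü'),('O','Ö')]
def pvEnt (x : Char) : List Char := ['&', x, 'u', 'm', 'l', ';']
def pvTail (x : Char) : List Char := [x, 'u', 'm', 'l', ';']

-- structural (fuel-free) form of PySem.Chars.replace for a nonempty pattern
def pvRepG (old new : List Char) : List Char → List Char
  | [] => []
  | c :: t =>
    if old.isPrefixOf (c :: t) then new ++ pvRepG old new (t.drop (old.length - 1))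
    else c :: pvRepG old new t
termination_by l => l.length
decreasing_by all_goals simp

-- one pass of A's pipeline, as a foldl step
def pvStep (l : List Char) (p : Char × Char) : List Char := pvRepG (pvEnt p.1) [p.2] l

lemma pvGo_spec (old new : List Char) (hold : old ≠ []) :
    ∀ (fuel : Nat) (l acc : List Char), l.length ≤ fuel →
      PySem.Chars.replace.go old new fuel l acc = acc.reverse ++ pvRepG old new l := by
  intro fuel
  induction fuel with
  | zero =>
    intro l acc hl
    have : l = [] := by cases l <;> simp_all
    subst this
    rw [PySem.Chars.replace.go.eq_def]
    simp [pvRepG]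
  | succ fuel ih =>
    intro l acc hl
    cases l with
    | nil =>
      rw [PySem.Chars.replace.go.eq_def]
      simp [pvRepG]
    | cons c t =>
      rw [PySem.Chars.replace.go.eq_def]
      by_cases hp : old.isPrefixOf (c :: t) = true
      · simp only [hp, if_true]
        obtain ⟨o, os, rfl⟩ : ∃ o os, old = o :: os := by cases old with
          | nil => exact absurd rfl hold
          | cons o os => exact ⟨o, os, rfl⟩
        have hdrop : List.drop (o :: os).length (c :: t) = t.drop ((o :: os).length - 1) := by
          simp
      
        rw [hdrop, ih (t.drop ((o :: os).length - 1)) (new.reverse ++ acc) (by simp at hl ⊢; omega)]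
        rw [pvRepG]
        simp [hp]
      · simp only [hp]
        rw [ih t (c :: acc) (by simp at hl ⊢; omega)]
        rw [pvRepG]
        simp [hp]

lemma pvReplace_eq (old new s : List Char) (hold : old ≠ []) :
    PySem.Chars.replace s old new = pvRepG old new s := by
  rw [PySem.Chars.replace]
  simp [List.isEmpty_eq_false_iff.mpr hold, pvGo_spec old new hold s.length s [] (le_refl _)]

lemma pvA_chars (text : String) :
    (umlauts_correct_sz text).toList = pvTbl.foldl pvStep text.toList := by
  show (PySem.Str.replace (PySem.Str.replace (PySem.Str.replace (PySem.Str.replace (PySem.Str.replace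
      (PySem.Str.replace text "&auml;" "ä") "&uuml;" "ü") "&ouml;" "ö") "&Auml;" "Ä") "&Uuml;" "Ü") "&Ouml;" "Ö").toList
    = pvTbl.foldl pvStep text.toList
  simp only [PySem.Str.toList_replace]
  rw [pvReplace_eq _ _ _ (by decide), pvReplace_eq _ _ _ (by decide), pvReplace_eq _ _ _ (by decide),
      pvReplace_eq _ _ _ (by decide), pvReplace_eq _ _ _ (by decide), pvReplace_eq _ _ _ (by decide)]
  rfl

lemma pvPush1 (x r c : Char) (t : List Char) (hc : c ≠ '&') :
    pvRepG (pvEnt x) [r] (c :: t) = c :: pvRepG (pvEnt x) [r] t := by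
  rw [pvRepG]
  have : (pvEnt x).isPrefixOf (c :: t) = false := by
    simp [pvEnt, List.isPrefixOf]
    intro h
    exact absurd h.symm hc
  simp [this]

lemma pvPushF (ps : List (Char × Char)) (c : Char) (hc : c ≠ '&') :
    ∀ l, ps.foldl pvStep (c :: l) = c :: ps.foldl pvStep l := by
  induction ps with
  | nil => intro l; simp
  | cons p ps ih =>
    intro l
    simp only [List.foldl_cons]
    rw [show pvStep (c :: l) p = c :: pvStep l p from pvPush1 p.1 p.2 c l hc, ih]

lemma pvPlainAux (x r : Char) (hx : (x, r) ∈ pvTbl) :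
    ∀ (n : Nat) (u w : List Char), u.length ≤ n →
      (∀ c ∈ w, c ≠ '&' ∧ ∀ p ∈ pvTbl, c ≠ p.2) →
      w <+: pvRepG (pvEnt x) [r] u → w <+: u := by
  intro n
  induction n with
  | zero =>
    intro u w hu _ hpre
    have : u = [] := by cases u <;> simp_all
    subst this
    rw [pvRepG] at hpre
    exact hpre
  | succ n ih =>
    intro u w hu hw hpre
    cases u with
    | nil => rw [pvRepG] at hpre; exact hpre
    | cons c t =>
      rw [pvRepG] at hpre
      by_cases hp : (pvEnt x).isPrefixOf (c :: t) = true
      · simp only [hp, if_true, List.singleton_append] at hpre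
        cases w with
        | nil => exact List.nil_prefix
        | cons d w' =>
          rw [List.cons_prefix_cons] at hpre
          exact absurd hpre.1 ((hw d (by simp)).2 (x, r) hx)
      · simp only [hp, Bool.false_eq_true, if_false] at hpre
        cases w with
        | nil => exact List.nil_prefix
        | cons d w' =>
          rw [List.cons_prefix_cons] at hpre ⊢
          refine ⟨hpre.1, ih t w' (by simp at hu; omega) (fun e he => hw e (by simp [he])) hpre.2⟩

-- entity-prefix test in terms of the tail after '&'
lemma pvEntPrefix (x : Char) (t : List Char) :
    (pvEnt x).isPrefixOf ('&' :: t) = true ↔ pvTail x <+: t := by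
  rw [List.isPrefixOf_iff_prefix]
  constructor
  · intro h; exact (List.cons_prefix_cons.mp h).2
  · intro h; exact List.cons_prefix_cons.mpr ⟨rfl, h⟩

-- the tail chars of every entity are neither '&' nor a replacement char
lemma pvTailPlain : ∀ p ∈ pvTbl, ∀ c ∈ pvTail p.1, c ≠ '&' ∧ ∀ q ∈ pvTbl, c ≠ q.2 := by
  intro p hp c hc
  fin_cases hp <;> simp only [pvTail, List.mem_cons, List.not_mem_nil, or_false] at hc <;>
    rcases hc with rfl | rfl | rfl | rfl | rfl <;>
    exact ⟨by decide, by intro q hq; fin_cases hq <;> decide⟩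

-- pipeline pushes past a '&' that starts no entity
lemma pvPushAmp (ps : List (Char × Char)) (hps : ∀ p ∈ ps, p ∈ pvTbl) :
    ∀ t, (∀ p ∈ pvTbl, ¬ pvTail p.1 <+: t) →
      ps.foldl pvStep ('&' :: t) = '&' :: ps.foldl pvStep t := by
  induction ps with
  | nil => intro t _; simp
  | cons p ps ih =>
    intro t ht
    have hfalse : (pvEnt p.1).isPrefixOf ('&' :: t) = false := by
      rw [Bool.eq_false_iff]
      intro h
      exact ht p (hps p (by simp)) ((pvEntPrefix p.1 t).mp h)
    have hstep : pvStep ('&' :: t) p = '&' :: pvStep t p := by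
      unfold pvStep
      rw [pvRepG, hfalse]
      simp
    simp only [List.foldl_cons, hstep]
    refine ih (fun q hq => hps q (by simp [hq])) (pvStep t p) (fun q hq hcon => ?_)
    exact ht q hq (pvPlainAux p.1 p.2 (hps p (by simp)) t.length t (pvTail q.1) (le_refl _)
      (pvTailPlain q hq) hcon)

-- pipeline stages whose key differs push past a whole entity
lemma pvPushEnt (x : Char) (hx : x ≠ '&') (ps : List (Char × Char))
    (hps : ∀ p ∈ ps, p.1 ≠ x) :
    ∀ rest, ps.foldl pvStep (pvEnt x ++ rest) = pvEnt x ++ ps.foldl pvStep rest := by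
  induction ps with
  | nil => intro rest; simp
  | cons p ps ih =>
    intro rest
    have hfalse : (pvEnt p.1).isPrefixOf ('&' :: x :: 'u' :: 'm' :: 'l' :: ';' :: rest) = false := by
      rw [Bool.eq_false_iff]
      intro h
      have := (pvEntPrefix p.1 (x :: 'u' :: 'm' :: 'l' :: ';' :: rest)).mp h
      rw [pvTail, List.cons_prefix_cons] at this
      exact hps p (by simp) this.1
    have hstep : pvStep (pvEnt x ++ rest) p = pvEnt x ++ pvStep rest p := by
      unfold pvStep
      show pvRepG (pvEnt p.1) [p.2] ('&' :: x :: 'u' :: 'm' :: 'l' :: ';' :: rest) = _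
      rw [pvRepG, hfalse]
      simp only [Bool.false_eq_true, if_false]
      rw [pvPush1 _ _ x _ hx, pvPush1 _ _ 'u' _ (by decide), pvPush1 _ _ 'm' _ (by decide),
          pvPush1 _ _ 'l' _ (by decide), pvPush1 _ _ ';' _ (by decide)]
      rfl
    simp only [List.foldl_cons, hstep]
    exact ih (fun q hq => hps q (by simp [hq])) (pvStep rest p)

-- the matching stage replaces the entity
lemma pvStepHit (x r : Char) (Z : List Char) :
    pvStep (pvEnt x ++ Z) (x, r) = r :: pvStep Z (x, r) := by
  unfold pvStep
  show pvRepG (pvEnt x) [r] ('&' :: x :: 'u' :: 'm' :: 'l' :: ';' :: Z) = _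
  rw [pvRepG]
  have : (pvEnt x).isPrefixOf ('&' :: x :: 'u' :: 'm' :: 'l' :: ';' :: Z) = true := by
    rw [List.isPrefixOf_iff_prefix]
    exact List.prefix_append (pvEnt x) Z
  rw [this]
  simp [pvEnt]

-- the whole pipeline on a string starting with the entity of (x, r) ∈ pvTbl
lemma pvKey (x r : Char) (pre post : List (Char × Char))
    (htbl : pvTbl = pre ++ (x, r) :: post)
    (hpre : ∀ p ∈ pre, p.1 ≠ x) (hx : x ≠ '&') (hr : r ≠ '&') (rest : List Char) :
    pvTbl.foldl pvStep (pvEnt x ++ rest) = r :: pvTbl.foldl pvStep rest := by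
  rw [htbl]
  rw [List.foldl_append, List.foldl_append, List.foldl_cons, List.foldl_cons]
  rw [pvPushEnt x hx pre hpre rest, pvStepHit, pvPushF post r hr]

lemma pvF_nil : pvTbl.foldl pvStep [] = [] := by
  have h : ∀ p, pvStep [] p = [] := fun p => by unfold pvStep; rw [pvRepG]
  simp [pvTbl, h]

lemma pvGetSome (l : List Char) (r : String)
    (h : pvReplB.get? (String.ofList (List.take 6 l)) = some r) :
    ∃ x rc, (x, rc) ∈ pvTbl ∧ pvEnt x <+: l ∧ r.toList = [rc] := by
  have htp : ∀ x : Char, List.take 6 l = pvEnt x → pvEnt x <+: l := by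
    intro x hx
    have := List.take_prefix 6 l
    rwa [hx] at this
  rw [pvReplB] at h
  rw [PySem.Dict.get?_mk_cons] at h
  split_ifs at h with h1
  · exact ⟨'a', 'ä', by decide, htp 'a' (by
      have := congrArg String.toList (beq_iff_eq.mp h1)
      simpa [String.toList_ofList, pvEnt] using this.symm), by rw [← Option.some_inj.mp h]; rfl⟩
  rw [PySem.Dict.get?_mk_cons] at h
  split_ifs at h with h2
  · exact ⟨'u', 'ü', by decide, htp 'u' (by
      have := congrArg String.toList (beq_iff_eq.mp h2)
      simpa [String.toList_ofList, pvEnt] using this.symm), by rw [← Option.some_inj.mp h]; rfl⟩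
  rw [PySem.Dict.get?_mk_cons] at h
  split_ifs at h with h3
  · exact ⟨'o', 'ö', by decide, htp 'o' (by
      have := congrArg String.toList (beq_iff_eq.mp h3)
      simpa [String.toList_ofList, pvEnt] using this.symm), by rw [← Option.some_inj.mp h]; rfl⟩
  rw [PySem.Dict.get?_mk_cons] at h
  split_ifs at h with h4
  · exact ⟨'A', 'Ä', by decide, htp 'A' (by
      have := congrArg String.toList (beq_iff_eq.mp h4)
      simpa [String.toList_ofList, pvEnt] using this.symm), by rw [← Option.some_inj.mp h]; rfl⟩
  rw [PySem.Dict.get?_mk_cons] at h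
  split_ifs at h with h5
  · exact ⟨'U', 'Ü', by decide, htp 'U' (by
      have := congrArg String.toList (beq_iff_eq.mp h5)
      simpa [String.toList_ofList, pvEnt] using this.symm), by rw [← Option.some_inj.mp h]; rfl⟩
  rw [PySem.Dict.get?_mk_cons] at h
  split_ifs at h with h6
  · exact ⟨'O', 'Ö', by decide, htp 'O' (by
      have := congrArg String.toList (beq_iff_eq.mp h6)
      simpa [String.toList_ofList, pvEnt] using this.symm), by rw [← Option.some_inj.mp h]; rfl⟩
  simp [PySem.Dict.get?] at h

lemma pvScanHit0 (rest : List Char) :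
    pvScanB (pvEnt 'a' ++ rest) = 'ä' :: pvScanB rest := by
  show pvScanB ('&' :: 'a' :: 'u' :: 'm' :: 'l' :: ';' :: rest) = _
  rw [pvScanB]
  simp only [List.take_succ_cons, List.take_zero, List.drop_succ_cons, List.drop_zero]
  rfl

lemma pvScanHit1 (rest : List Char) :
    pvScanB (pvEnt 'u' ++ rest) = 'ü' :: pvScanB rest := by
  show pvScanB ('&' :: 'u' :: 'u' :: 'm' :: 'l' :: ';' :: rest) = _
  rw [pvScanB]
  simp only [List.take_succ_cons, List.take_zero, List.drop_succ_cons, List.drop_zero]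
  rfl

lemma pvScanHit2 (rest : List Char) :
    pvScanB (pvEnt 'o' ++ rest) = 'ö' :: pvScanB rest := by
  show pvScanB ('&' :: 'o' :: 'u' :: 'm' :: 'l' :: ';' :: rest) = _
  rw [pvScanB]
  simp only [List.take_succ_cons, List.take_zero, List.drop_succ_cons, List.drop_zero]
  rfl

lemma pvScanHit3 (rest : List Char) :
    pvScanB (pvEnt 'A' ++ rest) = 'Ä' :: pvScanB rest := by
  show pvScanB ('&' :: 'A' :: 'u' :: 'm' :: 'l' :: ';' :: rest) = _
  rw [pvScanB]
  simp only [List.take_succ_cons, List.take_zero, List.drop_succ_cons, List.drop_zero]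
  rfl

lemma pvScanHit4 (rest : List Char) :
    pvScanB (pvEnt 'U' ++ rest) = 'Ü' :: pvScanB rest := by
  show pvScanB ('&' :: 'U' :: 'u' :: 'm' :: 'l' :: ';' :: rest) = _
  rw [pvScanB]
  simp only [List.take_succ_cons, List.take_zero, List.drop_succ_cons, List.drop_zero]
  rfl

lemma pvScanHit5 (rest : List Char) :
    pvScanB (pvEnt 'O' ++ rest) = 'Ö' :: pvScanB rest := by
  show pvScanB ('&' :: 'O' :: 'u' :: 'm' :: 'l' :: ';' :: rest) = _
  rw [pvScanB]
  simp only [List.take_succ_cons, List.take_zero, List.drop_succ_cons, List.drop_zero]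
  rfl

lemma pvMain : ∀ (n : Nat) (l : List Char), l.length ≤ n →
    pvTbl.foldl pvStep l = pvScanB l := by
  intro n
  induction n with
  | zero =>
    intro l hl
    have : l = [] := by cases l <;> simp_all
    subst this
    rw [pvF_nil, pvScanB]
  | succ n ih =>
    intro l hl
    cases l with
    | nil => rw [pvF_nil, pvScanB]
    | cons c t =>
      by_cases hE0 : pvEnt 'a' <+: (c :: t)
      · obtain ⟨rest, hrest⟩ := hE0
        rw [← hrest]
        have hlen : rest.length ≤ n := by
          have := congrArg List.length hrest
          simp [pvEnt] at this hl
          omega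
        rw [pvKey 'a' 'ä' [] [('u', 'ü'), ('o', 'ö'), ('A', 'Ä'), ('U', 'Ü'), ('O', 'Ö')] (by decide) (by decide) (by decide) (by decide) rest,
            pvScanHit0 rest, ih rest hlen]
      by_cases hE1 : pvEnt 'u' <+: (c :: t)
      · obtain ⟨rest, hrest⟩ := hE1
        rw [← hrest]
        have hlen : rest.length ≤ n := by
          have := congrArg List.length hrest
          simp [pvEnt] at this hl
          omega
        rw [pvKey 'u' 'ü' [('a', 'ä')] [('o', 'ö'), ('A', 'Ä'), ('U', 'Ü'), ('O', 'Ö')] (by decide) (by decide) (by decide) (by decide) rest,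
            pvScanHit1 rest, ih rest hlen]
      by_cases hE2 : pvEnt 'o' <+: (c :: t)
      · obtain ⟨rest, hrest⟩ := hE2
        rw [← hrest]
        have hlen : rest.length ≤ n := by
          have := congrArg List.length hrest
          simp [pvEnt] at this hl
          omega
        rw [pvKey 'o' 'ö' [('a', 'ä'), ('u', 'ü')] [('A', 'Ä'), ('U', 'Ü'), ('O', 'Ö')] (by decide) (by decide) (by decide) (by decide) rest,
            pvScanHit2 rest, ih rest hlen]
      by_cases hE3 : pvEnt 'A' <+: (c :: t)
      · obtain ⟨rest, hrest⟩ := hE3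
        rw [← hrest]
        have hlen : rest.length ≤ n := by
          have := congrArg List.length hrest
          simp [pvEnt] at this hl
          omega
        rw [pvKey 'A' 'Ä' [('a', 'ä'), ('u', 'ü'), ('o', 'ö')] [('U', 'Ü'), ('O', 'Ö')] (by decide) (by decide) (by decide) (by decide) rest,
            pvScanHit3 rest, ih rest hlen]
      by_cases hE4 : pvEnt 'U' <+: (c :: t)
      · obtain ⟨rest, hrest⟩ := hE4
        rw [← hrest]
        have hlen : rest.length ≤ n := by
          have := congrArg List.length hrest
          simp [pvEnt] at this hl
          omega
        rw [pvKey 'U' 'Ü' [('a', 'ä'), ('u', 'ü'), ('o', 'ö'), ('A', 'Ä')] [('O', 'Ö')] (by decide) (by decide) (by decide) (by decide) rest,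
            pvScanHit4 rest, ih rest hlen]
      by_cases hE5 : pvEnt 'O' <+: (c :: t)
      · obtain ⟨rest, hrest⟩ := hE5
        rw [← hrest]
        have hlen : rest.length ≤ n := by
          have := congrArg List.length hrest
          simp [pvEnt] at this hl
          omega
        rw [pvKey 'O' 'Ö' [('a', 'ä'), ('u', 'ü'), ('o', 'ö'), ('A', 'Ä'), ('U', 'Ü')] [] (by decide) (by decide) (by decide) (by decide) rest,
            pvScanHit5 rest, ih rest hlen]
      have hnone : pvReplB.get? (String.ofList (List.take 6 (c :: t))) = none := by
        cases hq : pvReplB.get? (String.ofList (List.take 6 (c :: t))) with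
        | none => rfl
        | some r =>
          obtain ⟨x, rc, hmem, hpref, -⟩ := pvGetSome (c :: t) r hq
          fin_cases hmem
          · exact absurd hpref hE0
          · exact absurd hpref hE1
          · exact absurd hpref hE2
          · exact absurd hpref hE3
          · exact absurd hpref hE4
          · exact absurd hpref hE5
      have hscan : pvScanB (c :: t) = c :: pvScanB t := by
        rw [pvScanB, hnone]
      rw [hscan]
      have hlen : t.length ≤ n := by simp at hl; omega
      by_cases hc : c = '&'
      · subst hc
        have hT : ∀ p ∈ pvTbl, ¬ pvTail p.1 <+: t := by
          intro p hp hcon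
          fin_cases hp
          · exact hE0 (List.cons_prefix_cons.mpr ⟨rfl, hcon⟩)
          · exact hE1 (List.cons_prefix_cons.mpr ⟨rfl, hcon⟩)
          · exact hE2 (List.cons_prefix_cons.mpr ⟨rfl, hcon⟩)
          · exact hE3 (List.cons_prefix_cons.mpr ⟨rfl, hcon⟩)
          · exact hE4 (List.cons_prefix_cons.mpr ⟨rfl, hcon⟩)
          · exact hE5 (List.cons_prefix_cons.mpr ⟨rfl, hcon⟩)
        rw [pvPushAmp pvTbl (fun p hp => hp) t hT, ih t hlen]
      · rw [pvPushF pvTbl c hc t, ih t hlen]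

-- ===== VERDICT (by name: the statement is the Claim_ definition above) =====
theorem umlauts_correct_sz_spec : Claim_equal_umlauts_correct_sz := by
  intro text _
  unfold Spec_umlauts_correct_sz umlauts_correct_sz_alt
  apply String.ext
  rw [pvA_chars text, String.toList_ofList]
  exact pvMain text.toList.length text.toList (le_refl _)
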